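-- pv_equiv track=rewrite | github.com/chandra122/OrionAiAgent | job_apply/greenhouse.py | _pick_dropdown_option
-- ===== SOURCE A (Python) =====
-- def _pick_dropdown_option(label: str, options: list[str], answers: dict) -> str | None:
--     label = label.lower()
--     clean_opts = [o.strip() for o in options if o.strip() and o.strip().lower() not in ("select", "-- select --", "")]
--     if not clean_opts:
--         return None
--     if any(k in label for k in ["authorized", "eligible", "work in"]):
--         for opt in clean_opts:
--             if "yes" in opt.lower():
--                 return opt
--     if any(k in label for k in ["sponsor", "visa"]):
--         for opt in clean_opts:
--             if "no" in opt.lower():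
--                 return opt
--     if "relocat" in label:
--         for opt in clean_opts:
--             if "no" in opt.lower():
--                 return opt
--     if any(k in label for k in ["hear", "source", "refer"]):
--         return clean_opts[0] if clean_opts else None
--     return None
-- ===== SOURCE B (Python) =====
-- # B: one fused pass over options accumulating (first yes-option, first no-option,
-- # first clean option); the label logic then just picks among these precomputed
-- # candidates -- no cleaned list is built and no per-rule rescans happen.
-- def _pick_dropdown_option(label: str, options: list[str], answers: dict) -> str | None:
--     lab = label.lower()
--     first_yes = first_no = first_any = None
--     for o in options:
--         s = o.strip()
--         low = s.lower()
--         if not s or low in ("select", "-- select --"):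
--             continue
--         if first_any is None:
--             first_any = s
--         if first_yes is None and "yes" in low:
--             first_yes = s
--         if first_no is None and "no" in low:
--             first_no = s
--     candidates = []
--     if any(k in lab for k in ("authorized", "eligible", "work in")):
--         candidates.append(first_yes)
--     if any(k in lab for k in ("sponsor", "visa")) or "relocat" in lab:
--         candidates.append(first_no)
--     if any(k in lab for k in ("hear", "source", "refer")):
--         candidates.append(first_any)
--     for c in candidates:
--         if c is not None:
--             return c
--     return None
-- ===== Notes on version B (the rewrite author's own statement) =====
-- stated objective: alternative
-- what changed: A builds a cleaned list and rescans it up to three times (plus an indexing step); B makes one fused pass over the raw options accumulating three candidates (first yes-option, first no-option, first clean option) and the label logic then merely selects the first applicable non-None candidate.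
import Mathlib
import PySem

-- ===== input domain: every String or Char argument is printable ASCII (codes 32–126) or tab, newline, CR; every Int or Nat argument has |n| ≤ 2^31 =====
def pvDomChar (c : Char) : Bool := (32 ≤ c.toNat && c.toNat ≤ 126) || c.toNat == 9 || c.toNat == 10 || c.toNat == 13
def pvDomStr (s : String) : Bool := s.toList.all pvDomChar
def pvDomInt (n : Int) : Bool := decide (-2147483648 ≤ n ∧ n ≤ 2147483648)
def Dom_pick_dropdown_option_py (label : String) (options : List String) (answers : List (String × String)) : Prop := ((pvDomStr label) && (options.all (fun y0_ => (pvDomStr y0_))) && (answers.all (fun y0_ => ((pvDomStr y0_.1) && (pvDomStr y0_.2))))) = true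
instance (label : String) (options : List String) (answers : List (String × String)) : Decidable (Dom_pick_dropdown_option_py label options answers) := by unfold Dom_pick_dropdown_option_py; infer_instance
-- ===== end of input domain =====

-- B fuses A's list-cleaning pass and the up-to-three rescans of the cleaned list into ONE pass
-- over options accumulating three candidates; the label logic then only picks among them (alternative).

-- ===== PORT A =====
def pick_dropdown_option_py (label : String) (options : List String) (answers : List (String × String)) : Option String :=
  let lab := PySem.Str.lower label
  -- the comprehension: strip each option once, keep it if it passes the test
  let clean_opts := options.filterMap (fun o =>
      let s := PySem.Str.strip o
      if s ≠ "" ∧ PySem.Str.lower s ∉ (["select", "-- select --", ""] : List String)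
      then some s else none)
  if clean_opts = [] then none
  else
    -- each 'for opt … return opt' loop ported as find?; guard-then-fallthrough as match on its result
    match (if (["authorized", "eligible", "work in"] : List String).any (fun k => PySem.Str.isIn k lab)
           then clean_opts.find? (fun opt => PySem.Str.isIn "yes" (PySem.Str.lower opt)) else none) with
    | some opt => some opt
    | none =>
      match (if (["sponsor", "visa"] : List String).any (fun k => PySem.Str.isIn k lab)
             then clean_opts.find? (fun opt => PySem.Str.isIn "no" (PySem.Str.lower opt)) else none) with
      | some opt => some opt
      | none =>
        match (if PySem.Str.isIn "relocat" lab
               then clean_opts.find? (fun opt => PySem.Str.isIn "no" (PySem.Str.lower opt)) else none) with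
        | some opt => some opt
        | none =>
          if (["hear", "source", "refer"] : List String).any (fun k => PySem.Str.isIn k lab)
          then clean_opts.head?   -- clean_opts[0] under the (redundant) guard 'if clean_opts else None'
          else none

-- ===== PORT B =====
-- the body of Source B's single for-loop: skip non-clean options, else update the
-- three accumulators (first_yes, first_no, first_any), each only while still None
def pvStep (acc : Option String × Option String × Option String) (o : String) :
    Option String × Option String × Option String :=
  let s := PySem.Str.strip o
  let low := PySem.Str.lower s
  if s = "" ∨ low ∈ (["select", "-- select --"] : List String) then acc
  else
    (if acc.1 = none ∧ PySem.Str.isIn "yes" low then some s else acc.1,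
     if acc.2.1 = none ∧ PySem.Str.isIn "no" low then some s else acc.2.1,
     if acc.2.2 = none then some s else acc.2.2)

def pick_dropdown_option_py_alt (label : String) (options : List String) (answers : List (String × String)) : Option String :=
  let lab := PySem.Str.lower label
  let st := options.foldl pvStep (none, none, none)
  -- the candidates list built by the three appends of Source B
  let candidates : List (Option String) :=
    (if (["authorized", "eligible", "work in"] : List String).any (fun k => PySem.Str.isIn k lab)
     then [st.1] else []) ++
    (if ((["sponsor", "visa"] : List String).any (fun k => PySem.Str.isIn k lab))
         || PySem.Str.isIn "relocat" lab
     then [st.2.1] else []) ++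
    (if (["hear", "source", "refer"] : List String).any (fun k => PySem.Str.isIn k lab)
     then [st.2.2] else [])
  -- 'for c in candidates: if c is not None: return c' / 'return None'
  candidates.findSome? (fun c => c)

-- ===== PRECONDITION & SPEC =====
def Spec_pick_dropdown_option_py (label : String) (options : List String) (answers : List (String × String)) (out : Option String) : Prop := out = pick_dropdown_option_py_alt label options answers
instance (label : String) (options : List String) (answers : List (String × String)) (out : Option String) : Decidable (Spec_pick_dropdown_option_py label options answers out) := by unfold Spec_pick_dropdown_option_py; infer_instance

-- ===== CLAIM (what is proved, stated in full; the proofs are below) =====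
def Claim_equal_pick_dropdown_option_py : Prop := ∀ (label : String) (options : List String) (answers : List (String × String)), Dom_pick_dropdown_option_py label options answers → Spec_pick_dropdown_option_py label options answers (pick_dropdown_option_py label options answers)

-- ===== LEMMAS AND PROOFS =====

-- the cleaned list, with B's membership test (no "" in the tuple)
def pvClean (l : List String) : List String :=
  (l.filter (fun o => decide (¬ (PySem.Str.strip o = "" ∨
      PySem.Str.lower (PySem.Str.strip o) ∈ (["select", "-- select --"] : List String))))).map PySem.Str.strip

-- A's comprehension as filter-then-map (the shape the scan lemma produces)
lemma clean_filterMap (l : List String) :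
    l.filterMap (fun o =>
      let s := PySem.Str.strip o
      if s ≠ "" ∧ PySem.Str.lower s ∉ (["select", "-- select --", ""] : List String)
      then some s else none)
    = (l.filter (fun o =>
       PySem.Str.strip o ≠ "" ∧
       PySem.Str.lower (PySem.Str.strip o) ∉ (["select", "-- select --", ""] : List String))).map PySem.Str.strip := by
  induction l with
  | nil => rfl
  | cons a t ih =>
    simp only [List.filterMap_cons, List.filter_cons]
    by_cases h : PySem.Str.strip a ≠ "" ∧
        PySem.Str.lower (PySem.Str.strip a) ∉ (["select", "-- select --", ""] : List String)
    · rw [if_pos h, if_pos (by simpa using h)]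
      simp only [List.map_cons, ih]
    · rw [if_neg h, if_neg (by simpa using h)]
      exact ih

lemma lower_eq_empty {s : String} (h : PySem.Str.lower s = "") : s = "" := by
  have h2 : (PySem.Str.lower s).toList = ([]:List Char) := by rw [h]; rfl
  rw [PySem.Str.toList_lower] at h2
  have h3 : s.toList = [] := by
    cases hs : s.toList with
    | nil => rfl
    | cons a t => rw [hs] at h2; simp [PySem.Chars.lower] at h2
  exact String.toList_inj.mp (by simp [h3])

-- B's clean test agrees with A's (which also lists ""): a non-empty strip never lowers to ""
lemma clean_eq (l : List String) :
    pvClean l = (l.filter (fun o =>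
      PySem.Str.strip o ≠ "" ∧
      PySem.Str.lower (PySem.Str.strip o) ∉ (["select", "-- select --", ""] : List String))).map PySem.Str.strip := by
  unfold pvClean
  congr 1
  apply List.filter_congr
  intro o _
  apply decide_eq_decide.mpr
  rw [not_or]
  constructor
  · rintro ⟨h1, h2⟩
    refine ⟨h1, fun hm => ?_⟩
    simp only [List.mem_cons, List.not_mem_nil, or_false] at hm h2
    rcases hm with h | h | h
    · exact h2 (Or.inl h)
    · exact h2 (Or.inr h)
    · exact h1 (lower_eq_empty h)
  · rintro ⟨h1, h2⟩
    refine ⟨h1, fun hm => h2 ?_⟩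
    simp only [List.mem_cons, List.not_mem_nil, or_false] at hm ⊢
    rcases hm with h | h
    · exact Or.inl h
    · exact Or.inr (Or.inl h)

-- the loop invariant: the fold computes the three first-matches of the cleaned list
set_option maxHeartbeats 1000000 in
lemma scan_eq (l : List String) (acc : Option String × Option String × Option String) :
    l.foldl pvStep acc =
      (Option.or acc.1 ((pvClean l).find? (fun s => PySem.Str.isIn "yes" (PySem.Str.lower s))),
       Option.or acc.2.1 ((pvClean l).find? (fun s => PySem.Str.isIn "no" (PySem.Str.lower s))),
       Option.or acc.2.2 (pvClean l).head?) := by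
  induction l generalizing acc with
  | nil =>
    obtain ⟨fy, fn, fa⟩ := acc
    cases fy <;> cases fn <;> cases fa <;> rfl
  | cons a t ih =>
    rw [List.foldl_cons, ih]
    by_cases h : PySem.Str.strip a = "" ∨
        PySem.Str.lower (PySem.Str.strip a) ∈ (["select", "-- select --"] : List String)
    · have hstep : pvStep acc a = acc := by
        unfold pvStep
        rw [if_pos h]
      have hcl : pvClean (a :: t) = pvClean t := by
        unfold pvClean
        rw [List.filter_cons, if_neg (by simp only [decide_eq_true_eq]; exact not_not_intro h)]
      rw [hstep, hcl]
    · have hcl : pvClean (a :: t) = PySem.Str.strip a :: pvClean t := by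
        unfold pvClean
        rw [List.filter_cons, if_pos (by simp only [decide_eq_true_eq]; exact h)]
        rfl
      have hstep : pvStep acc a =
          (if acc.1 = none ∧ PySem.Str.isIn "yes" (PySem.Str.lower (PySem.Str.strip a)) then some (PySem.Str.strip a) else acc.1,
           if acc.2.1 = none ∧ PySem.Str.isIn "no" (PySem.Str.lower (PySem.Str.strip a)) then some (PySem.Str.strip a) else acc.2.1,
           if acc.2.2 = none then some (PySem.Str.strip a) else acc.2.2) := by
        unfold pvStep
        rw [if_neg h]
      rw [hstep, hcl]
      have hfind : ∀ (p : String → Bool) (a0 : Option String),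
          Option.or (if a0 = none ∧ p (PySem.Str.strip a) then some (PySem.Str.strip a) else a0)
            (List.find? p (pvClean t))
          = Option.or a0 (List.find? p (PySem.Str.strip a :: pvClean t)) := by
        intro p a0
        by_cases hp : p (PySem.Str.strip a) = true
        · rw [List.find?_cons_of_pos hp]
          cases a0 <;> simp [hp, Option.or]
        · rw [List.find?_cons_of_neg hp]
          cases a0 <;> simp [hp, Option.or]
      have hhead : ∀ (a0 : Option String),
          Option.or (if a0 = none then some (PySem.Str.strip a) else a0)
            ((pvClean t).head?)
          = Option.or a0 ((PySem.Str.strip a :: pvClean t).head?) := by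
        intro a0; cases a0 <;> simp [Option.or]
      exact Prod.ext (hfind (fun s => PySem.Str.isIn "yes" (PySem.Str.lower s)) acc.1)
        (Prod.ext (hfind (fun s => PySem.Str.isIn "no" (PySem.Str.lower s)) acc.2.1) (hhead acc.2.2))

-- the pure label logic of B vs A's match-chain, on a nonempty cleaned list
lemma core (b1 bs bv br b4 : Bool) (fy fn : Option String) (h : String) :
    (match (if b1 then fy else none) with
     | some o => some o
     | none =>
       match (if bs || bv then fn else none) with
       | some o => some o
       | none =>
         match (if br then fn else none) with
         | some o => some o
         | none => if b4 then some h else none) =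
    ((if b1 then [fy] else []) ++ (if (bs || bv) || br then [fn] else []) ++
      (if b4 then [some h] else [])).findSome? (fun c => c) := by
  cases b1 <;> cases bs <;> cases bv <;> cases br <;> cases b4 <;> cases fy <;> cases fn <;> rfl

-- the same when the cleaned list is empty (all candidates are none)
lemma core_nil (b1 b2 b4 : Bool) :
    (none : Option String) =
    ((if b1 then [(none : Option String)] else []) ++ (if b2 then [none] else []) ++
      (if b4 then [none] else [])).findSome? (fun c => c) := by
  cases b1 <;> cases b2 <;> cases b4 <;> rfl

-- ===== VERDICT (by name: the statement is the Claim_ definition above) =====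
theorem pick_dropdown_option_py_spec : Claim_equal_pick_dropdown_option_py := by
  intro label options answers _
  unfold Spec_pick_dropdown_option_py pick_dropdown_option_py pick_dropdown_option_py_alt
  rw [clean_filterMap, scan_eq options (none, none, none), clean_eq]
  simp only [Option.none_or]
  generalize (options.filter _).map PySem.Str.strip = clean
  generalize PySem.Str.lower label = lab
  cases clean with
  | nil =>
    simp only [List.find?_nil, List.head?_nil]
    rw [if_pos trivial]
    exact core_nil _ _ _
  | cons h t =>
    have hne : h :: t ≠ [] := by simp
    simp only [if_neg hne, List.head?_cons, List.any_cons, List.any_nil, Bool.or_false]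
    exact core _ _ _ _ _ _ _ _
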